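-- pv_equiv track=rewrite | github.com/nathannahn/Set-War | playsetwar.py | IsDup
-- ===== SOURCE A (Python) =====
-- def IsDup(string1, string2, string3):
--         chk = 0
--         for x in range(len(string1)):
--             part1 = string1[x]
--             part2 = string2[x]
--             part3 = string3[x]
--             if (part1 == part2) and (part1 == part3) and (part2 == part3):
--                 chk = chk + 1
--             elif (part1 != part2) and (part1 != part3) and (part2 != part3):
--                 chk = chk + 1
--             else:
--                 pass
--         if chk == len(string1):
--             return True
--         else:
--             return False
-- ===== SOURCE B (Python) =====
-- def IsDup(string1, string2, string3):
--     n = len(string1)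
--     e12 = [string1[x] == string2[x] for x in range(n)]
--     e13 = [string1[x] == string3[x] for x in range(n)]
--     e23 = [string2[x] == string3[x] for x in range(n)]
--     return e12 == e13 == e23
-- ===== Notes on version B (the rewrite author's own statement) =====
-- stated objective: alternative
-- what changed: Instead of judging each position inside one counting loop, B builds three pairwise-equality mask lists in three staged passes and returns whether the masks are equal as lists (all-same gives True,True,True and all-different gives False,False,False, so validity at every position is exactly mask equality).
import Mathlib
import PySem

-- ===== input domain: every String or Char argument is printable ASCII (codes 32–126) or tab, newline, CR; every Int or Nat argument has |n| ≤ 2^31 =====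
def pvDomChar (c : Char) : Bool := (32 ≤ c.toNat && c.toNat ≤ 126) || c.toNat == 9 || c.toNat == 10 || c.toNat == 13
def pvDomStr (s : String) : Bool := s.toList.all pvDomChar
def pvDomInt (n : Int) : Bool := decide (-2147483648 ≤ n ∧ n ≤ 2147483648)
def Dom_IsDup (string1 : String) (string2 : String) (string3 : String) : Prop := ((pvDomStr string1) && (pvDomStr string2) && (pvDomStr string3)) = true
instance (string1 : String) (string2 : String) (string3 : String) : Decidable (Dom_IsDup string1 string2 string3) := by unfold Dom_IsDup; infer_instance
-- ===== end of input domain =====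

-- B replaces A's per-position counting loop by three staged passes that build
-- pairwise-equality mask lists and a final list comparison (alternative; same O(n) cost).

-- ===== PORT A =====
-- the for-loop over range(len(string1)) with the chk accumulator; none = IndexError
def IsDupLoop (l1 l2 l3 : List Char) (xs : List Int) (chk : Int) : Option Int :=
  match xs with
  | [] => some chk
  | x :: rest =>
    match PySem.List.pyGet? l1 x, PySem.List.pyGet? l2 x, PySem.List.pyGet? l3 x with
    | some part1, some part2, some part3 =>
      if part1 = part2 ∧ part1 = part3 ∧ part2 = part3 then
        IsDupLoop l1 l2 l3 rest (chk + 1)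
      else if part1 ≠ part2 ∧ part1 ≠ part3 ∧ part2 ≠ part3 then
        IsDupLoop l1 l2 l3 rest (chk + 1)
      else
        IsDupLoop l1 l2 l3 rest chk
    | _, _, _ => none

def IsDup (string1 : String) (string2 : String) (string3 : String) : Bool :=
  match IsDupLoop string1.toList string2.toList string3.toList
      (PySem.List.pyRange 0 string1.toList.length 1) 0 with
  | some chk => decide (chk = (string1.toList.length : Int))
  | none => false   -- unreachable under Pre_ (Python raises IndexError here)

-- ===== PORT B =====
-- one mask list comprehension [la[x] == lb[x] for x in idxs]; false = unreachable IndexError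
def pvMask (la lb : List Char) (idxs : List Int) : List Bool :=
  idxs.map (fun x =>
    match PySem.List.pyGet? la x, PySem.List.pyGet? lb x with
    | some a, some b => a == b
    | _, _ => false)

def IsDup_alt (string1 : String) (string2 : String) (string3 : String) : Bool :=
  let idxs := PySem.List.pyRange 0 string1.toList.length 1
  let e12 := pvMask string1.toList string2.toList idxs
  let e13 := pvMask string1.toList string3.toList idxs
  let e23 := pvMask string2.toList string3.toList idxs
  (e12 == e13) && (e13 == e23)    -- Python's chained e12 == e13 == e23

-- ===== PRECONDITION & SPEC =====
-- Pre_ excludes exactly the inputs where string2 or string3 is shorter than string1: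
-- there both A's and B's Python raise IndexError.
def Pre_IsDup (string1 : String) (string2 : String) (string3 : String) : Prop :=
  string1.toList.length ≤ string2.toList.length ∧ string1.toList.length ≤ string3.toList.length
instance (string1 : String) (string2 : String) (string3 : String) : Decidable (Pre_IsDup string1 string2 string3) := by unfold Pre_IsDup; infer_instance

def pvWitness_IsDup : String × String × String := ("abc", "abd", "xyz")

def Spec_IsDup (string1 : String) (string2 : String) (string3 : String) (out : Bool) : Prop := out = IsDup_alt string1 string2 string3
instance (string1 : String) (string2 : String) (string3 : String) (out : Bool) : Decidable (Spec_IsDup string1 string2 string3 out) := by unfold Spec_IsDup; infer_instance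

-- ===== CLAIM (what is proved, stated in full; the proofs are below) =====
def Claim_equal_IsDup : Prop := ∀ (string1 : String) (string2 : String) (string3 : String), Dom_IsDup string1 string2 string3 → Pre_IsDup string1 string2 string3 → Spec_IsDup string1 string2 string3 (IsDup string1 string2 string3)

-- ===== LEMMAS AND PROOFS =====

-- the per-position predicate A computes (for in-range positions)
def validPos (a b c : Char) : Bool :=
  if a = b ∧ a = c ∧ b = c then true
  else if a ≠ b ∧ a ≠ c ∧ b ≠ c then true
  else false

-- A's pairwise test holds iff the three pairwise-equality booleans coincide
theorem triple_eq (a b c : Char) :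
    (((a == b) = (a == c)) ∧ ((a == c) = (b == c))) ↔ validPos a b c = true := by
  by_cases hab : a = b <;> by_cases hac : a = c <;> by_cases hbc : b = c <;>
    simp [validPos, hab, hac, hbc]

theorem loop_eq (l1 l2 l3 : List Char) (xs : List Int)
    (h : ∀ x ∈ xs, 0 ≤ x ∧ x < l1.length ∧ x < l2.length ∧ x < l3.length)
    (chk : Int) :
    IsDupLoop l1 l2 l3 xs chk =
      some (chk + (xs.countP (fun x =>
        validPos (l1[x.toNat]!) (l2[x.toNat]!) (l3[x.toNat]!)))) := by
  induction xs generalizing chk with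
  | nil => simp [IsDupLoop]
  | cons x rest ih =>
    obtain ⟨h0, h1, h2, h3⟩ := h x (List.mem_cons_self ..)
    have g1 := PySem.List.pyGet?_eq_some_getElem (xs := l1) h0 h1
    have g2 := PySem.List.pyGet?_eq_some_getElem (xs := l2) h0 h2
    have g3 := PySem.List.pyGet?_eq_some_getElem (xs := l3) h0 h3
    have hrest : ∀ y ∈ rest, 0 ≤ y ∧ y < l1.length ∧ y < l2.length ∧ y < l3.length :=
      fun y hy => h y (List.mem_cons_of_mem _ hy)
    have e1 : l1[x.toNat]! = l1[x.toNat] := by rw [getElem!_pos]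
    have e2 : l2[x.toNat]! = l2[x.toNat] := by rw [getElem!_pos]
    have e3 : l3[x.toNat]! = l3[x.toNat] := by rw [getElem!_pos]
    rw [IsDupLoop]
    simp only [g1, g2, g3]
    split_ifs with hA hB
    · have hv : validPos l1[x.toNat]! l2[x.toNat]! l3[x.toNat]! = true := by
        simp [validPos, e1, e2, e3, hA]
      rw [ih hrest, List.countP_cons, hv]
      simp only [Option.some.injEq]
      push_cast; ring
    · have hv : validPos l1[x.toNat]! l2[x.toNat]! l3[x.toNat]! = true := by
        simp [validPos, e1, e2, e3, hB]
      rw [ih hrest, List.countP_cons, hv]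
      simp only [Option.some.injEq]
      push_cast; ring
    · have hv : validPos l1[x.toNat]! l2[x.toNat]! l3[x.toNat]! = false := by
        simp [validPos, e1, e2, e3, hA, hB]
      rw [ih hrest, List.countP_cons, hv]
      simp

theorem all_eq_countP {α : Type} (p : α → Bool) (xs : List α) :
    (xs.countP p = xs.length) ↔ ∀ x ∈ xs, p x = true := by
  induction xs with
  | nil => simp
  | cons x rest ih =>
    have hle := List.countP_le_length (p := p) (l := rest)
    by_cases hx : p x
    · simp [hx, ih]
    · simp [hx]
      omega

theorem map_eq_map_iff' {α β : Type} (f g : α → β) (xs : List α) :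
    xs.map f = xs.map g ↔ ∀ x ∈ xs, f x = g x := by
  induction xs with
  | nil => simp
  | cons x rest ih => simp [ih]

-- ===== VERDICT (by name: the statement is the Claim_ definition above) =====
theorem IsDup_spec : Claim_equal_IsDup := by
  intro s1 s2 s3 _ hpre
  obtain ⟨h2, h3⟩ := hpre
  unfold Spec_IsDup IsDup IsDup_alt
  have hmem : ∀ x ∈ PySem.List.pyRange 0 s1.toList.length 1,
      0 ≤ x ∧ x < s1.toList.length ∧ x < s2.toList.length ∧ x < s3.toList.length := by
    intro x hx
    rw [PySem.List.mem_pyRange_one] at hx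
    exact ⟨hx.1, hx.2, by omega, by omega⟩
  rw [loop_eq _ _ _ _ hmem]
  simp only [zero_add]
  have hlen : (PySem.List.pyRange 0 (s1.toList.length : Int) 1).length = s1.toList.length := by
    rw [PySem.List.length_pyRange_one]; omega
  -- A's side ↔ every position valid
  have hA : ((( PySem.List.pyRange 0 (s1.toList.length : Int) 1).countP (fun x =>
        validPos (s1.toList[x.toNat]!) (s2.toList[x.toNat]!) (s3.toList[x.toNat]!)) : Int)
        = (s1.toList.length : Int)) ↔
      ∀ x ∈ PySem.List.pyRange 0 (s1.toList.length : Int) 1,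
        validPos (s1.toList[x.toNat]!) (s2.toList[x.toNat]!) (s3.toList[x.toNat]!) = true := by
    have h' := all_eq_countP (fun x =>
        validPos (s1.toList[x.toNat]!) (s2.toList[x.toNat]!) (s3.toList[x.toNat]!))
      (PySem.List.pyRange 0 (s1.toList.length : Int) 1)
    rw [hlen] at h'
    exact Iff.trans Nat.cast_inj h'
  -- B's side ↔ every position valid
  have hB : (pvMask s1.toList s2.toList (PySem.List.pyRange 0 s1.toList.length 1)
          = pvMask s1.toList s3.toList (PySem.List.pyRange 0 s1.toList.length 1)
        ∧ pvMask s1.toList s3.toList (PySem.List.pyRange 0 s1.toList.length 1)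
          = pvMask s2.toList s3.toList (PySem.List.pyRange 0 s1.toList.length 1)) ↔
      ∀ x ∈ PySem.List.pyRange 0 (s1.toList.length : Int) 1,
        validPos (s1.toList[x.toNat]!) (s2.toList[x.toNat]!) (s3.toList[x.toNat]!) = true := by
    unfold pvMask
    rw [map_eq_map_iff', map_eq_map_iff']
    constructor
    · intro ⟨H1, H2⟩ x hx
      obtain ⟨h0, hx1, hx2, hx3⟩ := hmem x hx
      have g1 := PySem.List.pyGet?_eq_some_getElem (xs := s1.toList) h0 hx1
      have g2 := PySem.List.pyGet?_eq_some_getElem (xs := s2.toList) h0 hx2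
      have g3 := PySem.List.pyGet?_eq_some_getElem (xs := s3.toList) h0 hx3
      have H1x := H1 x hx
      have H2x := H2 x hx
      simp only [g1, g2, g3] at H1x H2x
      have e1 : s1.toList[x.toNat]! = s1.toList[x.toNat] := by rw [getElem!_pos]
      have e2 : s2.toList[x.toNat]! = s2.toList[x.toNat] := by rw [getElem!_pos]
      have e3 : s3.toList[x.toNat]! = s3.toList[x.toNat] := by rw [getElem!_pos]
      rw [e1, e2, e3]
      exact (triple_eq _ _ _).mp ⟨H1x, H2x⟩
    · intro H
      constructor <;> intro x hx <;> {
        obtain ⟨h0, hx1, hx2, hx3⟩ := hmem x hx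
        have g1 := PySem.List.pyGet?_eq_some_getElem (xs := s1.toList) h0 hx1
        have g2 := PySem.List.pyGet?_eq_some_getElem (xs := s2.toList) h0 hx2
        have g3 := PySem.List.pyGet?_eq_some_getElem (xs := s3.toList) h0 hx3
        have Hx := H x hx
        have e1 : s1.toList[x.toNat]! = s1.toList[x.toNat] := by rw [getElem!_pos]
        have e2 : s2.toList[x.toNat]! = s2.toList[x.toNat] := by rw [getElem!_pos]
        have e3 : s3.toList[x.toNat]! = s3.toList[x.toNat] := by rw [getElem!_pos]
        rw [e1, e2, e3] at Hx
        have := (triple_eq s1.toList[x.toNat] s2.toList[x.toNat] s3.toList[x.toNat]).mpr Hx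
        simp only [g1, g2, g3]
        first | exact this.1 | exact this.2
      }
  show decide _ = ((pvMask s1.toList s2.toList (PySem.List.pyRange 0 s1.toList.length 1)
          == pvMask s1.toList s3.toList (PySem.List.pyRange 0 s1.toList.length 1))
        && (pvMask s1.toList s3.toList (PySem.List.pyRange 0 s1.toList.length 1)
          == pvMask s2.toList s3.toList (PySem.List.pyRange 0 s1.toList.length 1)))
  rw [Bool.eq_iff_iff, decide_eq_true_iff]
  simp only [Bool.and_eq_true, beq_iff_eq]
  rw [hA, ← hB]
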